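-- pv_equiv track=rewrite | github.com/resemerge/nerfrag_dict | scripts/scraping/v2_renewable_energy_scraper.py | clean_and_deduplicate
-- ===== SOURCE A (Python) =====
-- from typing import Dict, List, Set
--
-- def clean_and_deduplicate(entities: Dict[str, List[str]]) -> Dict[str, List[str]]:
--     """Clean and deduplicate extracted entities"""
--     cleaned = {}
--
--     for category, entity_list in entities.items():
--         # Convert to set to remove duplicates, then back to list
--         unique_entities = set()
--
--         for entity in entity_list:
--             if isinstance(entity, str):
--                 # Clean the entity
--                 cleaned_entity = entity.strip().lower()
--                 # Remove very short or very long entities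
--                 if 2 <= len(cleaned_entity) <= 50:
--                     # Capitalize properly
--                     cleaned_entity = ' '.join(word.capitalize() for word in cleaned_entity.split())
--                     unique_entities.add(cleaned_entity)
--
--         cleaned[category] = sorted(list(unique_entities))
--
--     return cleaned
-- ===== SOURCE B (Python) =====
-- def clean_and_deduplicate(entities):
--     """Online insertion: each cleaned entity is placed at its sorted position
--     (skipped if already present), so the per-category list is sorted and
--     duplicate-free at every step -- no set and no sort call."""
--     result = {}
--     for category, entity_list in entities.items():
--         sorted_unique = []
--         for entity in entity_list:
--             if isinstance(entity, str):
--                 cleaned_entity = entity.strip().lower()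
--                 if 2 <= len(cleaned_entity) <= 50:
--                     cleaned_entity = ' '.join(word.capitalize() for word in cleaned_entity.split())
--                     i = 0
--                     while i < len(sorted_unique) and sorted_unique[i] < cleaned_entity:
--                         i += 1
--                     if i == len(sorted_unique) or sorted_unique[i] != cleaned_entity:
--                         sorted_unique.insert(i, cleaned_entity)
--         result[category] = sorted_unique
--     return result
-- ===== Notes on version B (the rewrite author's own statement) =====
-- stated objective: alternative
-- what changed: B never builds a set and never calls sort: it maintains each category's output as an always-sorted, duplicate-free list, inserting every cleaned entity at its scanned sorted position (or skipping it if already present), i.e. an online insertion-sort-with-dedup instead of A's hash-set dedup followed by a sort.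
import Mathlib
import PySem

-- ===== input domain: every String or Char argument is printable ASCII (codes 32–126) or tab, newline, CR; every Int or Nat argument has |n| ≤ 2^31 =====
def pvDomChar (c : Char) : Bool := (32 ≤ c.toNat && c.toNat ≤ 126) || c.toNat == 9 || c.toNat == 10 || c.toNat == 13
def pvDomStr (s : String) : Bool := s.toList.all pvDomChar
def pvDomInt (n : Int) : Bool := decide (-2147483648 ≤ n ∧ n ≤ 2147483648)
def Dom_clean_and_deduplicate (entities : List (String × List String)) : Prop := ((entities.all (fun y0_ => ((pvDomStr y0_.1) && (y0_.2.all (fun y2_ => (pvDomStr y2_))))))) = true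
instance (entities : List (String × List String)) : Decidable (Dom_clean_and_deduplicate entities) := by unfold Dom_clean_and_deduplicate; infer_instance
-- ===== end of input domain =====

-- B replaces A's set-dedup-then-sort by an online insertion-sort-with-dedup that keeps
-- each category's list sorted and duplicate-free at every step (alternative algorithm).

-- shared cleaning step (identical line in both Pythons): str.capitalize, exact on ASCII
def pyCapitalize (s : String) : String :=
  match s.toList with
  | [] => String.ofList []
  | c :: cs => String.ofList (PySem.Chars.upperChar c :: cs.map PySem.Chars.lowerChar)

-- ===== PORT A =====
def clean_and_deduplicate (entities : List (String × List String)) : List (String × List String) :=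
  (entities.foldl (fun cleaned p =>
      let unique_entities := p.2.foldl (fun s entity =>
          let cleaned_entity := PySem.Str.lower (PySem.Str.strip entity)
          if 2 ≤ PySem.Str.len cleaned_entity ∧ PySem.Str.len cleaned_entity ≤ 50 then
            PySem.Set.add s (PySem.Str.join " " ((PySem.Str.split₀ cleaned_entity).map pyCapitalize))
          else s) PySem.Set.empty
      cleaned.insert p.1 (PySem.List.sorted unique_entities (fun x => x)))
    PySem.Dict.empty).items

-- ===== PORT B =====
-- Source B's scan loop: i = 0; while i < len(l) and l[i] < x: i += 1   (i is never negative, so Nat)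
def pvFindPos (l : List String) (x : String) : Nat :=
  match l with
  | [] => 0
  | y :: t => if y < x then pvFindPos t x + 1 else 0

-- Source B's insert-unless-present step: if i == len(l) or l[i] != x: l.insert(i, x)
def pvInsertUnique (l : List String) (x : String) : List String :=
  let i := pvFindPos l x
  if i = l.length ∨ l[i]? ≠ some x then PySem.List.insert l (Int.ofNat i) x else l

def clean_and_deduplicate_alt (entities : List (String × List String)) : List (String × List String) :=
  (entities.foldl (fun result p =>
      let sorted_unique := p.2.foldl (fun su entity =>
          let cleaned_entity := PySem.Str.lower (PySem.Str.strip entity)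
          if 2 ≤ PySem.Str.len cleaned_entity ∧ PySem.Str.len cleaned_entity ≤ 50 then
            pvInsertUnique su (PySem.Str.join " " ((PySem.Str.split₀ cleaned_entity).map pyCapitalize))
          else su) []
      result.insert p.1 sorted_unique)
    PySem.Dict.empty).items

-- ===== PRECONDITION & SPEC =====
def Spec_clean_and_deduplicate (entities : List (String × List String)) (out : List (String × List String)) : Prop := out = clean_and_deduplicate_alt entities
instance (entities : List (String × List String)) (out : List (String × List String)) : Decidable (Spec_clean_and_deduplicate entities out) := by unfold Spec_clean_and_deduplicate; infer_instance

-- ===== CLAIM (what is proved, stated in full; the proofs are below) =====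
def Claim_equal_clean_and_deduplicate : Prop := ∀ (entities : List (String × List String)), Dom_clean_and_deduplicate entities → Spec_clean_and_deduplicate entities (clean_and_deduplicate entities)

-- ===== LEMMAS AND PROOFS =====

-- named forms of the two inner loop bodies (definitionally equal to the ports' lambdas)
def pvClean (entity : String) : String :=
  PySem.Str.join " " ((PySem.Str.split₀ (PySem.Str.lower (PySem.Str.strip entity))).map pyCapitalize)

def pvAStep (s : PySem.Set String) (entity : String) : PySem.Set String :=
  if 2 ≤ PySem.Str.len (PySem.Str.lower (PySem.Str.strip entity)) ∧
      PySem.Str.len (PySem.Str.lower (PySem.Str.strip entity)) ≤ 50 then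
    PySem.Set.add s (pvClean entity)
  else s

def pvBStep (su : List String) (entity : String) : List String :=
  if 2 ≤ PySem.Str.len (PySem.Str.lower (PySem.Str.strip entity)) ∧
      PySem.Str.len (PySem.Str.lower (PySem.Str.strip entity)) ≤ 50 then
    pvInsertUnique su (pvClean entity)
  else su

-- proof-side structural form of pvInsertUnique
def pvOrdIns (x : String) : List String → List String
  | [] => [x]
  | y :: t => if y < x then y :: pvOrdIns x t else if y = x then y :: t else x :: y :: t

-- the scan-position insert equals the structural ordered insert
theorem pv_insertUnique_eq_ordIns (x : String) : ∀ (l : List String),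
    pvInsertUnique l x = pvOrdIns x l := by
  intro l
  induction l with
  | nil => simp [pvInsertUnique, pvFindPos, pvOrdIns, PySem.List.insert_zero]
  | cons y t ih =>
    by_cases hlt : y < x
    · have hfp : pvFindPos (y :: t) x = pvFindPos t x + 1 := by simp [pvFindPos, hlt]
      have hle : pvFindPos t x ≤ t.length := by
        clear ih hfp
        induction t with
        | nil => simp [pvFindPos]
        | cons z u ihz =>
          by_cases h : z < x
          · simp [pvFindPos, h]; omega
          · simp [pvFindPos, h]
      have hins : PySem.List.insert (y :: t) (Int.ofNat (pvFindPos t x + 1)) x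
          = y :: PySem.List.insert t (Int.ofNat (pvFindPos t x)) x := by
        rw [show (Int.ofNat (pvFindPos t x + 1)) = ((pvFindPos t x + 1 : Nat) : Int) from rfl,
          PySem.List.insert_natCast _ _ _ (by simpa using Nat.succ_le_succ hle),
          show (Int.ofNat (pvFindPos t x)) = ((pvFindPos t x : Nat) : Int) from rfl,
          PySem.List.insert_natCast _ _ _ hle]
        simp
      have hget : (y :: t)[pvFindPos t x + 1]? = t[pvFindPos t x]? := by simp
      have hcond : (pvFindPos (y :: t) x = (y :: t).length ∨ (y :: t)[pvFindPos (y :: t) x]? ≠ some x)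
          ↔ (pvFindPos t x = t.length ∨ t[pvFindPos t x]? ≠ some x) := by
        rw [hfp, hget]; simp
      unfold pvInsertUnique pvOrdIns
      by_cases hc : pvFindPos t x = t.length ∨ t[pvFindPos t x]? ≠ some x
      · rw [if_pos (hcond.mpr hc), if_pos hlt, hfp, hins, ← ih]
        unfold pvInsertUnique
        rw [if_pos hc]
      · rw [if_neg (fun h => hc (hcond.mp h)), if_pos hlt, ← ih]
        unfold pvInsertUnique
        rw [if_neg hc]
    · have hfp : pvFindPos (y :: t) x = 0 := by simp [pvFindPos, hlt]
      unfold pvInsertUnique pvOrdIns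
      rw [hfp]
      by_cases hyx : y = x
      · rw [if_neg (by simp [hyx]), if_neg hlt, if_pos hyx]
      · rw [if_pos (by simp [hyx]), if_neg hlt, if_neg hyx,
          show (Int.ofNat 0) = (0 : Int) from rfl, PySem.List.insert_zero]

-- ordered insert keeps strict sortedness and adds exactly x to the members
theorem pv_ordIns_inv (x : String) : ∀ (l : List String), l.Pairwise (· < ·) →
    (pvOrdIns x l).Pairwise (· < ·) ∧ (∀ z, z ∈ pvOrdIns x l ↔ z = x ∨ z ∈ l) := by
  intro l
  induction l with
  | nil => intro _; exact ⟨by simp [pvOrdIns], by simp [pvOrdIns]⟩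
  | cons y t ih =>
    intro hp
    have hpt : t.Pairwise (· < ·) := hp.of_cons
    have hyt : ∀ z ∈ t, y < z := (List.pairwise_cons.mp hp).1
    obtain ⟨ihp, ihm⟩ := ih hpt
    by_cases hlt : y < x
    · constructor
      · rw [show pvOrdIns x (y :: t) = y :: pvOrdIns x t from by simp [pvOrdIns, hlt]]
        refine List.pairwise_cons.mpr ⟨?_, ihp⟩
        intro z hz
        rcases (ihm z).mp hz with rfl | hz'
        · exact hlt
        · exact hyt z hz'
      · intro z
        rw [show pvOrdIns x (y :: t) = y :: pvOrdIns x t from by simp [pvOrdIns, hlt]]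
        simp only [List.mem_cons, ihm z]
        tauto
    · by_cases hyx : y = x
      · rw [show pvOrdIns x (y :: t) = y :: t from by simp [pvOrdIns, hyx]]
        refine ⟨hp, fun z => ?_⟩
        rw [← hyx]
        simp only [List.mem_cons]
        tauto
      · have hxy : x < y := lt_of_le_of_ne (not_lt.mp hlt) (Ne.symm hyx)
        rw [show pvOrdIns x (y :: t) = x :: y :: t from by simp [pvOrdIns, hlt, hyx]]
        constructor
        · refine List.pairwise_cons.mpr ⟨?_, hp⟩
          intro z hz
          rcases List.mem_cons.mp hz with rfl | hz'
          · exact hxy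
          · exact lt_trans hxy (hyt z hz')
        · intro z; exact List.mem_cons

-- the filtered cleaned values of a list, in order (proof-side characterisation)
def pvVals (lst : List String) : List String :=
  lst.filterMap (fun entity =>
    if 2 ≤ PySem.Str.len (PySem.Str.lower (PySem.Str.strip entity)) ∧
        PySem.Str.len (PySem.Str.lower (PySem.Str.strip entity)) ≤ 50 then
      some (pvClean entity)
    else none)

-- A's set-building loop: membership is acc-members plus the cleaned values
theorem pv_setfold_mem (lst : List String) (s : PySem.Set String) (z : String) :
    z ∈ lst.foldl pvAStep s ↔ z ∈ s ∨ z ∈ pvVals lst := by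
  induction lst generalizing s with
  | nil => simp [pvVals]
  | cons e t ih =>
    by_cases h : 2 ≤ PySem.Str.len (PySem.Str.lower (PySem.Str.strip e)) ∧
        PySem.Str.len (PySem.Str.lower (PySem.Str.strip e)) ≤ 50
    · rw [List.foldl_cons, show pvAStep s e = PySem.Set.add s (pvClean e) from by
        unfold pvAStep; rw [if_pos h], ih]
      simp only [pvVals, List.filterMap_cons, if_pos h, PySem.Set.mem_add, List.mem_cons]
      rw [or_assoc]
    · rw [List.foldl_cons, show pvAStep s e = s from by unfold pvAStep; rw [if_neg h], ih]
      simp only [pvVals, List.filterMap_cons, if_neg h]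

-- A's set-building loop result is Nodup
theorem pv_setfold_nodup (lst : List String) (s : PySem.Set String) (hs : s.Nodup) :
    (lst.foldl pvAStep s).Nodup := by
  induction lst generalizing s with
  | nil => exact hs
  | cons e t ih =>
    by_cases h : 2 ≤ PySem.Str.len (PySem.Str.lower (PySem.Str.strip e)) ∧
        PySem.Str.len (PySem.Str.lower (PySem.Str.strip e)) ≤ 50
    · rw [List.foldl_cons, show pvAStep s e = PySem.Set.add s (pvClean e) from by
        unfold pvAStep; rw [if_pos h]]
      exact ih _ (PySem.Set.nodup_add _ _ hs)
    · rw [List.foldl_cons, show pvAStep s e = s from by unfold pvAStep; rw [if_neg h]]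
      exact ih _ hs

-- B's insertion loop: stays strictly sorted, members = acc-members plus the cleaned values
theorem pv_bfold_inv (lst : List String) (acc : List String) (hacc : acc.Pairwise (· < ·)) :
    (lst.foldl pvBStep acc).Pairwise (· < ·)
    ∧ (∀ z, z ∈ lst.foldl pvBStep acc ↔ z ∈ acc ∨ z ∈ pvVals lst) := by
  induction lst generalizing acc with
  | nil => exact ⟨hacc, by simp [pvVals]⟩
  | cons e t ih =>
    by_cases h : 2 ≤ PySem.Str.len (PySem.Str.lower (PySem.Str.strip e)) ∧
        PySem.Str.len (PySem.Str.lower (PySem.Str.strip e)) ≤ 50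
    · have hstep : pvBStep acc e = pvOrdIns (pvClean e) acc := by
        unfold pvBStep; rw [if_pos h]
        exact pv_insertUnique_eq_ordIns (pvClean e) acc
      obtain ⟨hsorted, hmem⟩ := pv_ordIns_inv (pvClean e) acc hacc
      obtain ⟨ihp, ihm⟩ := ih (pvOrdIns (pvClean e) acc) hsorted
      refine ⟨by rw [List.foldl_cons, hstep]; exact ihp, fun z => ?_⟩
      rw [List.foldl_cons, hstep, ihm z, hmem z]
      simp only [pvVals, List.filterMap_cons, if_pos h, List.mem_cons]
      rw [or_assoc, or_left_comm]
    · have hstep : pvBStep acc e = acc := by unfold pvBStep; rw [if_neg h]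
      obtain ⟨ihp, ihm⟩ := ih acc hacc
      refine ⟨by rw [List.foldl_cons, hstep]; exact ihp, fun z => ?_⟩
      rw [List.foldl_cons, hstep, ihm z]
      simp only [pvVals, List.filterMap_cons, if_neg h]

-- the two per-category value computations agree
theorem pv_value_eq (lst : List String) :
    PySem.List.sorted (lst.foldl pvAStep PySem.Set.empty) (fun x => x)
      = lst.foldl pvBStep [] := by
  obtain ⟨hbp, hbm⟩ := pv_bfold_inv lst [] (by simp)
  have hbnd : (lst.foldl pvBStep []).Nodup := hbp.imp ne_of_lt
  have hempty : (PySem.Set.empty : PySem.Set String) = PySem.Set.ofList [] := rfl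
  have hand : (lst.foldl pvAStep PySem.Set.empty).Nodup := by
    rw [hempty]
    exact pv_setfold_nodup lst _ (PySem.Set.nodup_ofList [])
  apply PySem.List.sorted_eq_of_perm_of_pairwise_lt
  · refine (List.perm_ext_iff_of_nodup hbnd hand).mpr ?_
    intro z
    rw [hbm z, pv_setfold_mem lst PySem.Set.empty z, hempty]
    simp
  · exact hbp

-- ===== VERDICT (by name: the statement is the Claim_ definition above) =====
theorem clean_and_deduplicate_spec : Claim_equal_clean_and_deduplicate := by
  intro entities _
  show (entities.foldl (fun cleaned p =>
      cleaned.insert p.1 (PySem.List.sorted (p.2.foldl pvAStep PySem.Set.empty) (fun x => x)))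
    PySem.Dict.empty).items
    = (entities.foldl (fun result p => result.insert p.1 (p.2.foldl pvBStep []))
    PySem.Dict.empty).items
  rw [show (fun (cleaned : PySem.Dict String (List String)) (p : String × List String) =>
      cleaned.insert p.1 (PySem.List.sorted (p.2.foldl pvAStep PySem.Set.empty) (fun x => x)))
      = (fun result p => result.insert p.1 (p.2.foldl pvBStep [])) from
    funext fun c => funext fun p => by rw [pv_value_eq]]
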